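-- pv_equiv track=rewrite | github.com/OmsinKrissada/com-prog-2110101-assignments | Part II/Odd-Odd-Functions.py | zip_odds
-- ===== SOURCE A (Python) =====
-- def is_odd(n):
--     return n % 2 == 1
--
-- def get_odds(x):
--     out = []
--     for n in x:
--         if is_odd(n):
--             out.append(n)
--     return out
--
-- def zip_odds(a, b):
--     filtered_a = get_odds(a)
--     filtered_b = get_odds(b)
--     out = []
--     for i in range(max(len(filtered_a), len(filtered_b))):
--         if i < len(filtered_a):
--             out.append(filtered_a[i])
--         if i < len(filtered_b):
--             out.append(filtered_b[i])
--     return out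
-- ===== SOURCE B (Python) =====
-- def zip_odds(a, b):
--     # Single role-swapping scan: walk both lists with cursors, emitting the next odd
--     # from the "current" list and swapping roles after each emission; no filtered
--     # intermediate lists are ever built.
--     out = []
--     cur, oth = a, b
--     i, j = 0, 0
--     while i < len(cur):
--         if cur[i] % 2 == 1:
--             out.append(cur[i])
--             cur, oth, i, j = oth, cur, j, i + 1
--         else:
--             i += 1
--     while j < len(oth):
--         if oth[j] % 2 == 1:
--             out.append(oth[j])
--         j += 1
--     return out
-- ===== Notes on version B (the rewrite author's own statement) =====
-- stated objective: alternative
-- what changed: Replaces A's two-phase filter-then-interleave (build both filtered lists, then a max-length index loop with bound checks) by a single role-swapping scan: two cursors walk the original lists, emitting the next odd from the current list and swapping the current/other roles after each emission, so no filtered intermediate lists are ever built.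
import Mathlib
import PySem

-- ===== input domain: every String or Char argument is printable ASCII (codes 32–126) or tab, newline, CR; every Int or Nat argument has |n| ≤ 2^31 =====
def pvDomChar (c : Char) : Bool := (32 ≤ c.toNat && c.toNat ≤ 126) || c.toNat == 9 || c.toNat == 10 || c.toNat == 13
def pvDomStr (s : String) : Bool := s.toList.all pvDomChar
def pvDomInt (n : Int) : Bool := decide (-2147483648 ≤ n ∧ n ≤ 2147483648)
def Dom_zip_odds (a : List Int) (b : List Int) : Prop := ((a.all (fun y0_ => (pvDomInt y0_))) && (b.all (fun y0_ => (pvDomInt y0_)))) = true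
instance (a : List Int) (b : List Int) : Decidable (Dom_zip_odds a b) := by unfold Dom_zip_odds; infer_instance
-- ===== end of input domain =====

-- B replaces A's filter-then-interleave by a single role-swapping scan over the original
-- lists (objective: alternative; same asymptotic cost).

-- ===== PORT A =====
def pv_is_odd (n : Int) : Bool := PySem.Int.mod n 2 == 1

def pv_get_odds (x : List Int) : List Int :=
  x.foldl (fun out n => if pv_is_odd n then out ++ [n] else out) []

def zip_odds (a : List Int) (b : List Int) : List Int :=
  let filtered_a := pv_get_odds a
  let filtered_b := pv_get_odds b
  (PySem.List.pyRange 0 (max (filtered_a.length : Int) (filtered_b.length : Int)) 1).foldl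
    (fun out i =>
      let out := if i < (filtered_a.length : Int) then out ++ [PySem.List.pyGetD filtered_a i 0] else out
      if i < (filtered_b.length : Int) then out ++ [PySem.List.pyGetD filtered_b i 0] else out)
    []

-- ===== PORT B =====
-- second while-loop of Source B: flush the remaining odds of `oth` from index j
def pvAltTail (oth : List Int) (j : Nat) (out : List Int) : List Int :=
  if j < oth.length then
    pvAltTail oth (j + 1)
      (if PySem.Int.mod (oth.getD j 0) 2 == 1 then out ++ [oth.getD j 0] else out)
  else out
termination_by oth.length - j

-- first while-loop of Source B: role-swapping scan with cursors i (into cur) and j (into oth)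
-- (the Python cursors start at 0 and only increment, so Nat indices are exact)
def pvAltLoop (cur oth : List Int) (i j : Nat) (out : List Int) : List Int :=
  if i < cur.length then
    if PySem.Int.mod (cur.getD i 0) 2 == 1 then
      pvAltLoop oth cur j (i + 1) (out ++ [cur.getD i 0])
    else
      pvAltLoop cur oth (i + 1) j out
  else
    pvAltTail oth j out
termination_by (cur.length - i) + (oth.length - j)
decreasing_by all_goals omega

def zip_odds_alt (a : List Int) (b : List Int) : List Int :=
  pvAltLoop a b 0 0 []

-- ===== PRECONDITION & SPEC =====
def Spec_zip_odds (a : List Int) (b : List Int) (out : List Int) : Prop := out = zip_odds_alt a b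
instance (a : List Int) (b : List Int) (out : List Int) : Decidable (Spec_zip_odds a b out) := by unfold Spec_zip_odds; infer_instance

-- ===== CLAIM (what is proved, stated in full; the proofs are below) =====
def Claim_equal_zip_odds : Prop := ∀ (a : List Int) (b : List Int), Dom_zip_odds a b → Spec_zip_odds a b (zip_odds a b)

-- ===== LEMMAS AND PROOFS (helpers) =====

def pvOdds (xs : List Int) : List Int := xs.filter (fun n => PySem.Int.mod n 2 == 1)

-- one optional element: xs[k] as a length-0-or-1 list
def pvTake1 (xs : List Int) (k : Nat) : List Int :=
  if k < xs.length then [xs.getD k 0] else []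

def pvItl : List Int → List Int → List Int
  | [], ys => ys
  | xs, [] => xs
  | x :: xs, y :: ys => x :: y :: pvItl xs ys

theorem pvItl_nil (xs : List Int) : pvItl xs [] = xs := by
  cases xs <;> rfl

theorem pvItl_swap (xs ys : List Int) (x : Int) : pvItl (x :: xs) ys = x :: pvItl ys xs := by
  cases ys with
  | nil => simp [pvItl]
  | cons y ys' =>
    rw [show pvItl (x :: xs) (y :: ys') = x :: y :: pvItl xs ys' from rfl, pvItl_swap ys' xs y]
termination_by xs.length + ys.length

theorem pvTake1_cons_succ (x : Int) (xs : List Int) (k : Nat) :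
    pvTake1 (x :: xs) (k + 1) = pvTake1 xs k := by
  simp [pvTake1]

-- A-side characterisation: flatMap of optional pairs over range(max) is the interleave
theorem pvA_flatMap (xs ys : List Int) :
    (List.range (max xs.length ys.length)).flatMap
      (fun k => pvTake1 xs k ++ pvTake1 ys k) = pvItl xs ys := by
  induction xs generalizing ys with
  | nil =>
    induction ys with
    | nil => simp [pvItl]
    | cons y ys ihy =>
      simp only [List.length_nil, List.length_cons, Nat.max_eq_right (Nat.zero_le _),
        List.range_succ_eq_map, List.flatMap_cons, List.flatMap_map]
      have h1 : (fun k => pvTake1 ([] : List Int) (k + 1) ++ pvTake1 (y :: ys) (k + 1)) =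
          fun k => pvTake1 ([] : List Int) k ++ pvTake1 ys k := by
        funext k; simp [pvTake1]
      rw [h1]
      simpa [pvTake1, pvItl, Nat.max_eq_right (Nat.zero_le _)] using ihy
  | cons x xs ihx =>
    cases ys with
    | nil =>
      have := ihx []
      simp only [List.length_cons, List.length_nil, Nat.max_eq_left (Nat.zero_le _),
        List.range_succ_eq_map, List.flatMap_cons, List.flatMap_map] at *
      have h1 : (fun k => pvTake1 (x :: xs) (k + 1) ++ pvTake1 ([] : List Int) (k + 1)) =
          fun k => pvTake1 xs k ++ pvTake1 ([] : List Int) k := by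
        funext k; simp [pvTake1]
      rw [h1]
      simpa [pvTake1, pvItl_nil, Nat.max_eq_left (Nat.zero_le _)] using this
    | cons y ys =>
      simp only [List.length_cons, Nat.succ_max_succ, List.range_succ_eq_map,
        List.flatMap_cons, List.flatMap_map]
      have h1 : (fun k => pvTake1 (x :: xs) (k + 1) ++ pvTake1 (y :: ys) (k + 1)) =
          fun k => pvTake1 xs k ++ pvTake1 ys k := by
        funext k; simp [pvTake1_cons_succ]
      rw [h1]
      simpa [pvTake1, pvItl] using ihx ys

theorem pv_get_odds_eq (x : List Int) : pv_get_odds x = pvOdds x := by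
  simpa [pv_get_odds, pv_is_odd, pvOdds] using
    PySem.List.foldl_append_if_eq_filter (fun n => PySem.Int.mod n 2 == 1) x []

-- A's loop over pyRange, reduced to the interleave
theorem pvA_loop (xs ys : List Int) :
    (PySem.List.pyRange 0 (max (xs.length : Int) (ys.length : Int)) 1).foldl
      (fun out i =>
        let out := if i < (xs.length : Int) then out ++ [PySem.List.pyGetD xs i 0] else out
        if i < (ys.length : Int) then out ++ [PySem.List.pyGetD ys i 0] else out)
      [] = pvItl xs ys := by
  have hmax : max (xs.length : Int) (ys.length : Int) = ((max xs.length ys.length : Nat) : Int) := by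
    simp [Nat.cast_max]
  rw [hmax, PySem.List.pyRange_zero_nat, List.foldl_map]
  have hbody : (fun (out : List Int) (k : Nat) =>
      let out' := if ((k : Int) : Int) < (xs.length : Int) then out ++ [PySem.List.pyGetD xs (k : Int) 0] else out
      if ((k : Int) : Int) < (ys.length : Int) then out' ++ [PySem.List.pyGetD ys (k : Int) 0] else out') =
      fun out k => out ++ (pvTake1 xs k ++ pvTake1 ys k) := by
    funext out k
    by_cases h1 : k < xs.length <;> by_cases h2 : k < ys.length <;>
      simp [pvTake1, h1, h2, PySem.List.pyGetD_natCast]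
  simp only [hbody]
  rw [PySem.List.foldl_append_eq_flatMap]
  simpa using pvA_flatMap xs ys

-- B's tail loop: flushes the odds of the suffix
theorem pvOdds_cons (x : Int) (l : List Int) :
    pvOdds (x :: l) = if PySem.Int.mod x 2 == 1 then x :: pvOdds l else pvOdds l := by
  simp [pvOdds, List.filter_cons]

theorem pvAltTail_eq (oth : List Int) (j : Nat) (out : List Int) :
    pvAltTail oth j out = out ++ pvOdds (oth.drop j) := by
  rw [pvAltTail]
  by_cases h : j < oth.length
  · rw [if_pos h, pvAltTail_eq oth (j + 1)]
    have hdrop : oth.drop j = oth[j] :: oth.drop (j + 1) := List.drop_eq_getElem_cons h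
    have hgd : oth.getD j 0 = oth[j] := List.getD_eq_getElem oth 0 h
    rw [hgd, hdrop, pvOdds_cons]
    by_cases hodd : (PySem.Int.mod oth[j] 2 == 1) = true
    · rw [if_pos hodd, if_pos hodd, List.append_assoc]
      rfl
    · rw [if_neg hodd, if_neg hodd]
  · rw [if_neg h]
    have : oth.length ≤ j := by omega
    simp [pvOdds, List.drop_eq_nil_of_le this]
termination_by oth.length - j

-- B's main loop: interleaves the odds of the two suffixes
theorem pvAltLoop_eq (cur oth : List Int) (i j : Nat) (out : List Int) :
    pvAltLoop cur oth i j out = out ++ pvItl (pvOdds (cur.drop i)) (pvOdds (oth.drop j)) := by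
  rw [pvAltLoop]
  by_cases h : i < cur.length
  · have hdrop : cur.drop i = cur[i] :: cur.drop (i + 1) := List.drop_eq_getElem_cons h
    have hgd : cur.getD i 0 = cur[i] := List.getD_eq_getElem cur 0 h
    rw [if_pos h, hgd, hdrop, pvOdds_cons]
    by_cases hodd : (PySem.Int.mod cur[i] 2 == 1) = true
    · rw [if_pos hodd, if_pos hodd, pvAltLoop_eq oth cur j (i + 1), pvItl_swap,
        List.append_assoc]
      rfl
    · rw [if_neg hodd, if_neg hodd, pvAltLoop_eq cur oth (i + 1) j]
  · rw [if_neg h, pvAltTail_eq]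
    have : cur.length ≤ i := by omega
    simp [pvOdds, List.drop_eq_nil_of_le this, pvItl]
termination_by (cur.length - i) + (oth.length - j)
decreasing_by all_goals omega

-- ===== VERDICT (by name: the statement is the Claim_ definition above) =====
theorem zip_odds_spec : Claim_equal_zip_odds := by
  intro a b _
  unfold Spec_zip_odds zip_odds zip_odds_alt
  simp only [pv_get_odds_eq]
  rw [pvA_loop, pvAltLoop_eq]
  simp
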